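-- pv_equiv track=rewrite | github.com/Rofutok112/raythm | tools/chart_ml/src/chart_ml/simple_model.py | _is_valid_transition
-- ===== SOURCE A (Python) =====
-- Pattern = str
--
-- LANE_STATE_ORDER = ("off", "tap", "hold_start", "holding", "hold_end")
--
-- def _pattern_states(pattern: Pattern) -> list[str]:
--     return pattern.split("|")
--
-- def _is_valid_transition(previous: Pattern, current: Pattern) -> bool:
--     previous_states = _pattern_states(previous)
--     current_states = _pattern_states(current)
--     if len(previous_states) != len(current_states):
--         return False
--
--     for previous_state, current_state in zip(previous_states, current_states):
--         if previous_state in {"off", "tap", "hold_end"} and current_state == "holding":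
--             return False
--         if current_state not in LANE_STATE_ORDER:
--             return False
--         if previous_state in {"hold_start", "holding"} and current_state not in {"holding", "hold_end"}:
--             return False
--         if previous_state in {"off", "tap", "hold_end"} and current_state == "hold_end":
--             return False
--     return True
-- ===== SOURCE B (Python) =====
-- LANE_STATE_ORDER = ("off", "tap", "hold_start", "holding", "hold_end")
--
-- # Numeric encoding of states: off=0, tap=1, hold_start=2, holding=3, hold_end=4.
-- # A pair (p, c) is valid iff c is a known state and, when p is known,
-- # "c is a hold continuation (c >= 3)" holds exactly when "p opened/continues a hold (2 <= p <= 3)".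
-- _CODE = {state: i for i, state in enumerate(LANE_STATE_ORDER)}
--
--
-- def _is_valid_transition(previous, current):
--     def walk(ps, cs):
--         if not ps or not cs:
--             return not ps and not cs
--         c = _CODE.get(cs[0])
--         if c is None:
--             return False
--         p = _CODE.get(ps[0])
--         if p is not None and (c >= 3) != (2 <= p <= 3):
--             return False
--         return walk(ps[1:], cs[1:])
--
--     return walk(previous.split("|"), current.split("|"))
-- ===== Notes on version B (the rewrite author's own statement) =====
-- stated objective: alternative
-- what changed: B encodes each state as its numeric index in LANE_STATE_ORDER and validates each lane with a single arithmetic test ((c >= 3) must equal (2 <= p <= 3)), walking both token lists by simultaneous recursion with no separate length check instead of A's length precheck plus a zip loop over four inline set-membership rules.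
import Mathlib
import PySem

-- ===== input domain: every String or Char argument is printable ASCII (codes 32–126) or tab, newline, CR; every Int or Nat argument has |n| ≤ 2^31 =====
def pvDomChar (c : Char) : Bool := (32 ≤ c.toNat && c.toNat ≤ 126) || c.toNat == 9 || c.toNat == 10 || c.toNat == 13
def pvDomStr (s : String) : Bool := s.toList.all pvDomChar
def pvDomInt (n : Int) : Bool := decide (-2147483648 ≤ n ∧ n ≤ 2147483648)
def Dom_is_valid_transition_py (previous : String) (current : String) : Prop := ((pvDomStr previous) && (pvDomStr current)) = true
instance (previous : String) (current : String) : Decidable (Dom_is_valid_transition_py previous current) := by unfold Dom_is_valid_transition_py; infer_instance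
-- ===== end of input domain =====

-- B replaces A's length check + four per-lane rule checks by a numeric state encoding
-- (index in LANE_STATE_ORDER) with one arithmetic test per lane, checked by a single
-- simultaneous recursion over both token lists (objective: alternative).


-- ===== PORT A =====
def pyLaneStateOrder : List String := ["off", "tap", "hold_start", "holding", "hold_end"]

-- pattern.split("|")
def pyPatternStates (pattern : String) : List String := (PySem.Str.split? pattern "|").getD []  -- sep "|" ≠ "": split? is always some here

-- the for-loop of A, with its early returns, over the zipped state lists
def pyLoopA : List (String × String) → Bool
  | [] => true
  | (p, c) :: rest =>
    if (p == "off" || p == "tap" || p == "hold_end") && c == "holding" then false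
    else if !(pyLaneStateOrder.contains c) then false
    else if (p == "hold_start" || p == "holding") && !(c == "holding" || c == "hold_end") then false
    else if (p == "off" || p == "tap" || p == "hold_end") && c == "hold_end" then false
    else pyLoopA rest

def is_valid_transition_py (previous : String) (current : String) : Bool :=
  let previous_states := pyPatternStates previous
  let current_states := pyPatternStates current
  if previous_states.length != current_states.length then false
  else pyLoopA (previous_states.zip current_states)

-- ===== PORT B =====
-- _CODE = {state: i for i, state in enumerate(LANE_STATE_ORDER)}
def pyCode : PySem.Dict String Int :=
  PySem.Dict.ofList ((PySem.List.enumerate ["off", "tap", "hold_start", "holding", "hold_end"]).map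
    (fun is => (is.2, is.1)))

-- the inner recursive walk over both token lists simultaneously
def pyWalk : List String → List String → Bool
  | [], [] => true            -- not ps and not cs
  | [], _ :: _ => false
  | _ :: _, [] => false
  | p :: ps, c :: cs =>
    match PySem.Dict.get? pyCode c with
    | none => false
    | some cv =>
      match PySem.Dict.get? pyCode p with
      | none => pyWalk ps cs
      | some pv =>
        if (decide (3 ≤ cv)) != (decide (2 ≤ pv) && decide (pv ≤ 3)) then false
        else pyWalk ps cs

def is_valid_transition_py_alt (previous : String) (current : String) : Bool :=
  pyWalk ((PySem.Str.split? previous "|").getD []) ((PySem.Str.split? current "|").getD [])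

-- ===== PRECONDITION & SPEC =====
def Spec_is_valid_transition_py (previous : String) (current : String) (out : Bool) : Prop := out = is_valid_transition_py_alt previous current
instance (previous : String) (current : String) (out : Bool) : Decidable (Spec_is_valid_transition_py previous current out) := by unfold Spec_is_valid_transition_py; infer_instance

-- ===== CLAIM (what is proved, stated in full; the proofs are below) =====
def Claim_equal_is_valid_transition_py : Prop := ∀ (previous : String) (current : String), Dom_is_valid_transition_py previous current → Spec_is_valid_transition_py previous current (is_valid_transition_py previous current)

-- ===== LEMMAS AND PROOFS =====

-- the per-pair "pass" value of A's loop body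
def stepA (p c : String) : Bool :=
  !((p == "off" || p == "tap" || p == "hold_end") && c == "holding") &&
  pyLaneStateOrder.contains c &&
  !((p == "hold_start" || p == "holding") && !(c == "holding" || c == "hold_end")) &&
  !((p == "off" || p == "tap" || p == "hold_end") && c == "hold_end")

-- the per-pair "pass" value of B's walk body
def stepB (p c : String) : Bool :=
  match PySem.Dict.get? pyCode c with
  | none => false
  | some cv =>
    match PySem.Dict.get? pyCode p with
    | none => true
    | some pv => !((decide (3 ≤ cv)) != (decide (2 ≤ pv) && decide (pv ≤ 3)))

lemma pyCode_mk : pyCode = PySem.Dict.mk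
    [("off", 0), ("tap", 1), ("hold_start", 2), ("holding", 3), ("hold_end", 4)] := by decide

lemma pyCode_unknown (q : String) (h1 : ¬q = "off") (h2 : ¬q = "tap") (h3 : ¬q = "hold_start")
    (h4 : ¬q = "holding") (h5 : ¬q = "hold_end") :
    PySem.Dict.get? pyCode q = none := by
  rw [pyCode_mk]
  simp [PySem.Dict.get?, Ne.symm h1, Ne.symm h2, Ne.symm h3, Ne.symm h4, Ne.symm h5]

lemma step_eq (p c : String) : stepA p c = stepB p c := by
  by_cases hc : c = "off" ∨ c = "tap" ∨ c = "hold_start" ∨ c = "holding" ∨ c = "hold_end"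
  · by_cases hp : p = "off" ∨ p = "tap" ∨ p = "hold_start" ∨ p = "holding" ∨ p = "hold_end"
    · rcases hp with h|h|h|h|h <;> rcases hc with h'|h'|h'|h'|h' <;> subst h <;> subst h' <;> decide
    · push_neg at hp
      obtain ⟨h1, h2, h3, h4, h5⟩ := hp
      rcases hc with h'|h'|h'|h'|h' <;> subst h' <;>
        (simp only [stepB, pyCode_unknown p h1 h2 h3 h4 h5];
         simp [stepA, pyCode_mk, PySem.Dict.get?, pyLaneStateOrder, h1, h2, h3, h4, h5])
  · push_neg at hc
    obtain ⟨c1, c2, c3, c4, c5⟩ := hc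
    simp only [stepB, pyCode_unknown c c1 c2 c3 c4 c5]
    simp [stepA, pyLaneStateOrder, c1, c2, c3, c4, c5]

lemma loopA_cons (p c : String) (l : List (String × String)) :
    pyLoopA ((p, c) :: l) = (stepA p c && pyLoopA l) := by
  simp only [pyLoopA, stepA]
  by_cases h1 : ((p == "off" || p == "tap" || p == "hold_end") && c == "holding") = true <;>
    by_cases h2 : (pyLaneStateOrder.contains c) = true <;>
    by_cases h3 : ((p == "hold_start" || p == "holding") && !(c == "holding" || c == "hold_end")) = true <;>
    by_cases h4 : ((p == "off" || p == "tap" || p == "hold_end") && c == "hold_end") = true <;>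
    simp [h1, h2, h3, h4, Bool.and_assoc, beq_eq_decide]

lemma walk_cons (p c : String) (ps cs : List String) :
    pyWalk (p :: ps) (c :: cs) = (stepB p c && pyWalk ps cs) := by
  simp only [pyWalk, stepB]
  rcases hC : PySem.Dict.get? pyCode c with _ | cv
  · rfl
  · rcases hP : PySem.Dict.get? pyCode p with _ | pv
    · simp
    · by_cases h : ((decide (3 ≤ cv)) != (decide (2 ≤ pv) && decide (pv ≤ 3))) = true
      · simp [h]
      · simp only [Bool.not_eq_true] at h
        simp [h]

lemma walk_eq (ps : List String) : ∀ cs : List String,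
    pyWalk ps cs = (decide (ps.length = cs.length) && pyLoopA (ps.zip cs)) := by
  induction ps with
  | nil => intro cs; cases cs <;> simp [pyWalk, pyLoopA]
  | cons p ps ih =>
    intro cs
    cases cs with
    | nil => simp [pyWalk]
    | cons c cs =>
      rw [walk_cons, ← step_eq, List.zip_cons_cons, loopA_cons, ih cs]
      cases h : decide (ps.length = cs.length) <;> simp [h]

-- ===== VERDICT (by name: the statement is the Claim_ definition above) =====
theorem is_valid_transition_py_spec : Claim_equal_is_valid_transition_py := by
  intro previous current _
  unfold Spec_is_valid_transition_py is_valid_transition_py is_valid_transition_py_alt pyPatternStates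
  rw [walk_eq]
  by_cases h : ((PySem.Str.split? previous "|").getD []).length = ((PySem.Str.split? current "|").getD []).length <;>
    simp [h]
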